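-- pv_equiv track=rewrite | github.com/Youyu-eyes/codeforces-classification | 贪心 思维 构造/2171F. Rae Taylor and Trees (hard version).py | solve
-- ===== SOURCE A (Python) =====
-- def solve(n, nums):
--     pre = [0] * n
--     pre[0] = nums[0]
--     for i in range(1, n):
--         pre[i] = min(pre[i - 1], nums[i])
--
--     suf = [(0, 0)] * n
--     suf[-1] = (nums[-1], n - 1)
--     for i in range(n - 2, -1, -1):
--         if nums[i] > suf[i + 1][0]:
--             suf[i] = (nums[i], i)
--         else:
--             suf[i] = suf[i + 1]
--
--     valid = True
--     for i in range(n - 1):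
--         if pre[i] > suf[i + 1][0]:
--             valid = False
--             break
--
--     if not valid:
--         return []
--
--     edges = []
--     l = 0
--     while l < n:
--         r = suf[l][1]
--         for i in range(l, r):
--             edges.append((nums[i], nums[r]))
--         if l > 1:
--             edges.append((pre[l - 1], nums[r]))
--         l = r + 1
--
--     return edges
-- ===== SOURCE B (Python) =====
-- def solve(n, nums):
--     last = nums[-1]
--     # One forward pass with a strictly-decreasing monotonic stack: surviving entries
--     # are exactly the "right records" (indices greater than every value to their
--     # right in the scan list nums[:n-1] + [nums[-1]]); each entry also carries the
--     # running minimum of the values strictly before it, so no pre/suf arrays exist.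
--     stack = []  # (index, value, min of values before index, or None at index 0)
--     pm = None
--     for i in range(n):
--         x = last if i == n - 1 else nums[i]
--         while stack and stack[-1][1] <= x:
--             stack.pop()
--         stack.append((i, x, pm))
--         pm = x if pm is None or x < pm else pm
--     # invalid iff, for some consecutive records p < r, the prefix minimum through p
--     # exceeds r's value
--     for (p, vp, qp), (r, v, q) in zip(stack, stack[1:]):
--         if (vp if qp is None else min(qp, vp)) > v:
--             return []
--     edges = []
--     l = 0
--     prev = None
--     for r, v, q in stack:
--         for i in range(l, r):
--             edges.append((nums[i], nums[r]))
--         if l > 1: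
--             edges.append((min(prev[2], prev[1]), nums[r]))
--         l = r + 1
--         prev = (r, v, q)
--     return edges
-- ===== Notes on version B (the rewrite author's own statement) =====
-- stated objective: alternative
-- what changed: B replaces A's three array passes (prefix-min array, backward suffix (max,argmax) array, per-index validity scan) by a single forward pass with a strictly-decreasing monotonic stack whose pops discover the segment endpoints, with the prefix minimum fused into each stack entry, so no pre/suf arrays are materialised; validity is checked only between consecutive stack records and edges are emitted by walking the stack.
import Mathlib
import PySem

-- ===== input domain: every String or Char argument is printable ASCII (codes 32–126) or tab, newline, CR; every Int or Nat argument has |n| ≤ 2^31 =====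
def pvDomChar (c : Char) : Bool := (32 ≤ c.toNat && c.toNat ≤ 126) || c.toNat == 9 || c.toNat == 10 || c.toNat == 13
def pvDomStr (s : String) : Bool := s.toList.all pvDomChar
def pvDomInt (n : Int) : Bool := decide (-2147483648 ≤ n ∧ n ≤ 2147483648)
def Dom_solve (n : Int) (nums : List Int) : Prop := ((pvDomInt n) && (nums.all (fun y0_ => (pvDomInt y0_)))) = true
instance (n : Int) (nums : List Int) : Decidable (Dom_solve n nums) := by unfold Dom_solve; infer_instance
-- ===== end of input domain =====

-- B replaces A's three array passes (prefix-min array, backward suffix (max, argmax) array,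
-- per-index validity scan) by a single forward pass with a strictly-decreasing monotonic
-- stack whose pops discover the segment endpoints, with the prefix minimum fused into each
-- stack entry; validity is checked only between consecutive stack records and edges are
-- emitted by walking the stack (objective: alternative decomposition, same O(n) cost).

-- ===== PORT A =====
-- for i in range(1, n): pre[i] = min(pre[i-1], nums[i])   (indices in range under Pre_)
def preFill (nums : List Int) (pre : List Int) (is : List Int) : List Int :=
  match is with
  | [] => pre
  | i :: rest =>
      preFill nums
        (PySem.List.pySetD pre i (min (PySem.List.pyGetD pre (i - 1) 0) (PySem.List.pyGetD nums i 0)))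
        rest

-- for i in range(n-2, -1, -1): suf[i] = (nums[i], i) if nums[i] > suf[i+1][0] else suf[i+1]
def sufFill (nums : List Int) (suf : List (Int × Int)) (is : List Int) : List (Int × Int) :=
  match is with
  | [] => suf
  | i :: rest =>
      let s := PySem.List.pyGetD suf (i + 1) (0, 0)
      let v := PySem.List.pyGetD nums i 0
      sufFill nums (PySem.List.pySetD suf i (if v > s.1 then (v, i) else s)) rest

-- for i in range(n-1): if pre[i] > suf[i+1][0]: valid = False; break
def validLoop (pre : List Int) (suf : List (Int × Int)) (is : List Int) : Bool :=
  match is with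
  | [] => true
  | i :: rest =>
      if PySem.List.pyGetD pre i 0 > (PySem.List.pyGetD suf (i + 1) (0, 0)).1 then false
      else validLoop pre suf rest

-- while l < n: … l = r + 1  (fuel bounds the iteration count; n+1 suffices under Pre_, proved below)
def edgeLoop (nums pre : List Int) (suf : List (Int × Int)) (n : Int) (fuel : Nat)
    (l : Int) (edges : List (Int × Int)) : List (Int × Int) :=
  match fuel with
  | 0 => edges
  | Nat.succ fuel =>
      if l < n then
        let r := (PySem.List.pyGetD suf l (0, 0)).2
        let edges := edges ++
          (PySem.List.pyRange l r 1).map (fun i => (PySem.List.pyGetD nums i 0, PySem.List.pyGetD nums r 0))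
        let edges := if l > 1 then edges ++ [(PySem.List.pyGetD pre (l - 1) 0, PySem.List.pyGetD nums r 0)] else edges
        edgeLoop nums pre suf n fuel (r + 1) edges
      else edges

def solve (n : Int) (nums : List Int) : List (Int × Int) :=
  let pre0 := PySem.List.pySetD (List.replicate n.toNat (0 : Int)) 0 (PySem.List.pyGetD nums 0 0)
  let pre := preFill nums pre0 (PySem.List.pyRange 1 n 1)
  let suf0 := PySem.List.pySetD (List.replicate n.toNat ((0 : Int), (0 : Int))) (-1)
      (PySem.List.pyGetD nums (-1) 0, n - 1)
  let suf := sufFill nums suf0 (PySem.List.pyRange (n - 2) (-1) (-1))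
  let valid := validLoop pre suf (PySem.List.pyRange 0 (n - 1) 1)
  if valid = false then [] else edgeLoop nums pre suf n (n.toNat + 1) 0 []

-- ===== PORT B =====
-- stack entries are (index, value, running min of values before index, None at index 0);
-- the Lean stack is kept top-first (Python's append/pop at the right end = cons/tail here)

-- while stack and stack[-1][1] <= x: stack.pop()
def popLe (x : Int) : List (Int × Int × Option Int) → List (Int × Int × Option Int)
  | [] => []
  | e :: rest => if e.2.1 ≤ x then popLe x rest else e :: rest

-- the single forward pass building the stack and the running prefix minimum
def buildStack (nums : List Int) (n last : Int) :
    List Int → List (Int × Int × Option Int) × Option Int → List (Int × Int × Option Int) × Option Int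
  | [], st => st
  | i :: rest, st =>
      let x := if i = n - 1 then last else PySem.List.pyGetD nums i 0
      let stack := (i, x, st.2) :: popLe x st.1
      let pm := match st.2 with
        | none => some x
        | some m => some (if x < m then x else m)
      buildStack nums n last rest (stack, pm)

-- vp if qp is None else min(qp, vp)
def preOfRec (e : Int × Int × Option Int) : Int :=
  match e.2.2 with
  | none => e.2.1
  | some q => min q e.2.1

-- min(prev[2], prev[1]); the catch-all 0 is unreachable: Python reads prev only under l > 1,
-- where prev exists and carries a set prefix-min
def prevBound (prev : Option (Int × Int × Option Int)) : Int :=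
  match prev with
  | some (_, vp, some qp) => min qp vp
  | _ => 0

-- the emission walk over the stack (bottom-first), carrying l and the previous record
def emitB (nums : List Int) : List (Int × Int × Option Int) → Int → Option (Int × Int × Option Int) →
    List (Int × Int) → List (Int × Int)
  | [], _, _, edges => edges
  | e :: rest, l, prev, edges =>
      let r := e.1
      let edges := edges ++
        (PySem.List.pyRange l r 1).map (fun i => (PySem.List.pyGetD nums i 0, PySem.List.pyGetD nums r 0))
      let edges := if l > 1 then edges ++ [(prevBound prev, PySem.List.pyGetD nums r 0)] else edges
      emitB nums rest (r + 1) (some e) edges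

def solve_alt (n : Int) (nums : List Int) : List (Int × Int) :=
  let last := PySem.List.pyGetD nums (-1) 0
  let st := buildStack nums n last (PySem.List.pyRange 0 n 1) ([], none)
  let stack := st.1.reverse
  if (stack.zip (PySem.List.slice stack (some 1) none)).any
      (fun pq => decide (preOfRec pq.1 > pq.2.2.1)) then []
  else emitB nums stack 0 none []

-- ===== PRECONDITION & SPEC =====
-- Pre_ is exactly where A returns normally: A raises IndexError when n ≤ 0 (pre[0] on an empty
-- list) or n > len(nums) (nums[i] out of range); it returns on every 1 ≤ n ≤ len(nums).
def Pre_solve (n : Int) (nums : List Int) : Prop := 1 ≤ n ∧ n ≤ (nums.length : Int)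
instance (n : Int) (nums : List Int) : Decidable (Pre_solve n nums) := by unfold Pre_solve; infer_instance
def pvWitness_solve : Int × List Int := (3, [2, 1, 3])

def Spec_solve (n : Int) (nums : List Int) (out : List (Int × Int)) : Prop := out = solve_alt n nums
instance (n : Int) (nums : List Int) (out : List (Int × Int)) : Decidable (Spec_solve n nums out) := by unfold Spec_solve; infer_instance

-- ===== CLAIM (what is proved, stated in full; the proofs are below) =====
def Claim_equal_solve : Prop := ∀ (n : Int) (nums : List Int), Dom_solve n nums → Pre_solve n nums → Spec_solve n nums (solve n nums)

-- ===== LEMMAS AND PROOFS =====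

-- ---- canonical descriptions of the two programs' data ----
-- Throughout, the "scan list" w is the list of values both suffix machineries see: the first n
-- elements of nums with position n-1 carrying nums[-1] (exactly what A's seed suf[-1] and B's
-- `last` branch use); edges are emitted from nums itself.

/-- maximum of a suffix (0 on the empty list, never used there) -/
def sufMax : List Int → Int
  | [] => 0
  | [x] => x
  | x :: y :: t => max x (sufMax (y :: t))

/-- position (first component carries the base index i) of the rightmost maximum -/
def sufArg : Int → List Int → Int
  | i, [] => i
  | i, [_] => i
  | i, x :: y :: t => if sufMax (y :: t) < x then i else sufArg (i + 1) (y :: t)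

/-- ascending list of (record position, record value): positions strictly above everything right -/
def recsP : Int → List Int → List (Int × Int)
  | _, [] => []
  | i, [x] => [(i, x)]
  | i, x :: y :: t => if sufMax (y :: t) < x then (i, x) :: recsP (i + 1) (y :: t) else recsP (i + 1) (y :: t)

/-- the list A's suffix fill produces -/
def sufList : Int → List Int → List (Int × Int)
  | _, [] => []
  | i, x :: t => (sufMax (x :: t), sufArg i (x :: t)) :: sufList (i + 1) t

/-- prefix minima with running minimum m -/
def pminL : Int → List Int → List Int
  | _, [] => []
  | m, x :: t => (if x < m then x else m) :: pminL (if x < m then x else m) t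

/-- the prefix-min component B stores with the record at position k -/
def pmS (w : List Int) (k : Nat) : Option Int :=
  if k = 0 then none else some ((pminL (w.getD 0 0) w).getD (k - 1) 0)

/-- B's stack entry for a record -/
def enrichW (w : List Int) (p : Int × Int) : Int × Int × Option Int := (p.1, p.2, pmS w p.1.toNat)

lemma sufMax_cons (x : Int) (l : List Int) (h : l ≠ []) : sufMax (x :: l) = max x (sufMax l) := by
  cases l with
  | nil => simp at h
  | cons y t => rfl

lemma sufArg_cons (i x : Int) (l : List Int) (h : l ≠ []) :
    sufArg i (x :: l) = if sufMax l < x then i else sufArg (i + 1) l := by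
  cases l with
  | nil => simp at h
  | cons y t => rfl

lemma recsP_cons (i x : Int) (l : List Int) (h : l ≠ []) :
    recsP i (x :: l) = if sufMax l < x then (i, x) :: recsP (i + 1) l else recsP (i + 1) l := by
  cases l with
  | nil => simp at h
  | cons y t => rfl

lemma sufArg_bounds (l : List Int) : ∀ i, l ≠ [] → i ≤ sufArg i l ∧ sufArg i l < i + l.length := by
  induction l with
  | nil => intro i h; simp at h
  | cons x t ih =>
    intro i _
    cases t with
    | nil => simp [sufArg]
    | cons y t' =>
      simp only [sufArg]
      split
      · simp; omega
      · have := ih (i + 1) (by simp)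
        simp [List.length_cons] at this ⊢
        omega

lemma head_le_sufMax (x : Int) (t : List Int) : x ≤ sufMax (x :: t) := by
  cases t with
  | nil => simp [sufMax]
  | cons y t' => simp [sufMax]

lemma seg_const (o : Nat) : ∀ (l : List Int) (i : Int), l ≠ [] → (o : Int) ≤ sufArg i l - i →
    sufMax (l.drop o) = sufMax l ∧ sufArg (i + o) (l.drop o) = sufArg i l := by
  induction o with
  | zero => intro l i h _; simp
  | succ o ih =>
    intro l i h ho
    cases l with
    | nil => simp at h
    | cons x t =>
      cases t with
      | nil => simp [sufArg] at ho; omega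
      | cons y t' =>
        rw [sufArg_cons i x (y :: t') (by simp)] at ho ⊢
        by_cases hrec : sufMax (y :: t') < x
        · simp [hrec] at ho; omega
        · simp only [if_neg hrec]
          have hb := sufArg_bounds (y :: t') (i + 1) (by simp)
          have h1 : (o : Int) ≤ sufArg (i + 1) (y :: t') - (i + 1) := by push_cast at ho ⊢; omega
          have := ih (y :: t') (i + 1) (by simp) h1
          constructor
          · rw [List.drop_succ_cons]
            rw [this.1, sufMax_cons x (y :: t') (by simp)]
            have : x ≤ sufMax (y :: t') := by omega
            omega
          · rw [List.drop_succ_cons]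
            have harg : i + (↑o + 1) = (i + 1) + ↑o := by ring
            push_cast
            rw [harg]
            exact this.2

lemma recsP_spine (l : List Int) : ∀ i, l ≠ [] →
    recsP i l = (sufArg i l, sufMax l) :: recsP (sufArg i l + 1) (l.drop ((sufArg i l - i).toNat + 1)) := by
  induction l with
  | nil => intro i h; simp at h
  | cons x t ih =>
    intro i _
    cases t with
    | nil => simp [recsP, sufArg, sufMax]
    | cons y t' =>
      rw [recsP_cons i x (y :: t') (by simp), sufArg_cons i x (y :: t') (by simp)]
      by_cases hrec : sufMax (y :: t') < x
      · simp only [if_pos hrec]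
        have hx : sufMax (x :: y :: t') = x := by
          rw [sufMax_cons x (y :: t') (by simp)]; omega
        rw [hx]
        congr 1
        simp
      · simp only [if_neg hrec]
        have hb := sufArg_bounds (y :: t') (i + 1) (by simp)
        rw [ih (i + 1) (by simp)]
        have hmx : sufMax (x :: y :: t') = sufMax (y :: t') := by
          rw [sufMax_cons x (y :: t') (by simp)]; omega
        rw [hmx]
        congr 1
        have : (sufArg (i + 1) (y :: t') - i).toNat + 1 = ((sufArg (i + 1) (y :: t') - (i + 1)).toNat + 1) + 1 := by omega
        rw [this]
        simp [List.drop_succ_cons]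

lemma sufList_getD (xs : List Int) : ∀ (i : Int) (k : Nat), k < xs.length →
    (sufList i xs).getD k (0, 0) = (sufMax (xs.drop k), sufArg (i + k) (xs.drop k)) := by
  induction xs with
  | nil => intro i k h; simp at h
  | cons x t ih =>
    intro i k h
    cases k with
    | zero => simp [sufList]
    | succ k =>
      simp only [sufList, List.getD_cons_succ, List.drop_succ_cons]
      rw [ih (i + 1) k (by simpa using h)]
      congr 2
      push_cast
      ring

lemma length_pminL (xs : List Int) : ∀ m, (pminL m xs).length = xs.length := by
  induction xs with
  | nil => intro m; rfl
  | cons x t ih => intro m; simp [pminL, ih]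

lemma pminL_getD_succ (xs : List Int) : ∀ (m : Int) (k : Nat), k + 1 < xs.length →
    (pminL m xs).getD (k + 1) 0 =
      if xs.getD (k + 1) 0 < (pminL m xs).getD k 0 then xs.getD (k + 1) 0 else (pminL m xs).getD k 0 := by
  induction xs with
  | nil => intro m k h; simp at h
  | cons x t ih =>
    intro m k h
    cases k with
    | zero =>
      cases t with
      | nil => simp at h
      | cons y t' => simp [pminL]
    | succ k =>
      simp only [pminL, List.getD_cons_succ]
      exact ih _ k (by simpa using h)

lemma pminL_anti (xs : List Int) (m : Int) : ∀ (i k : Nat), i ≤ k → k < xs.length →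
    (pminL m xs).getD k 0 ≤ (pminL m xs).getD i 0 := by
  intro i k
  induction k with
  | zero =>
    intro h _
    have hi : i = 0 := by omega
    subst hi; exact le_refl _
  | succ k ih =>
    intro h hk
    rcases Nat.eq_or_lt_of_le h with rfl | hlt
    · rfl
    · have := ih (by omega) (by omega)
      rw [pminL_getD_succ xs m k hk]
      split <;> omega

-- ---- per-input abbreviations ----

/-- rightmost argmax of w[j:] as a Nat -/
def sargN (w : List Int) (j : Nat) : Nat := (sufArg (j : Int) (w.drop j)).toNat

lemma drop_cons (w : List Int) (j : Nat) (h : j < w.length) :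
    w.drop j = w.getD j 0 :: w.drop (j + 1) := by
  rw [List.getD_eq_getElem?_getD, List.getElem?_eq_getElem h]
  simp only [Option.getD_some]
  exact (List.getElem_cons_drop h).symm

lemma sargN_spec (w : List Int) (j : Nat) (h : j < w.length) :
    sufArg (j : Int) (w.drop j) = ((sargN w j : Nat) : Int) ∧ j ≤ sargN w j ∧ sargN w j < w.length := by
  have hne : w.drop j ≠ [] := by simp; omega
  have hb := sufArg_bounds (w.drop j) (j : Int) hne
  have hlen : (w.drop j).length = w.length - j := by simp
  unfold sargN
  omega

lemma recs_spine (w : List Int) (j : Nat) (h : j < w.length) :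
    recsP (j : Int) (w.drop j) =
      (((sargN w j : Nat) : Int), sufMax (w.drop j)) :: recsP ((sargN w j + 1 : Nat) : Int) (w.drop (sargN w j + 1)) := by
  have hs := sargN_spec w j h
  have hne : w.drop j ≠ [] := by simp; omega
  rw [recsP_spine (w.drop j) (j : Int) hne, hs.1]
  have h2 : (w.drop j).drop ((((sargN w j : Nat) : Int) - (j : Int)).toNat + 1) = w.drop (sargN w j + 1) := by
    rw [List.drop_drop]; congr 1; omega
  have h3 : ((sargN w j + 1 : Nat) : Int) = ((sargN w j : Nat) : Int) + 1 := by push_cast; ring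
  rw [h2, h3]

lemma seg_const_drop (w : List Int) (j m : Nat) (hj : j < w.length)
    (h1 : j ≤ m) (h2 : m ≤ sargN w j) :
    sufMax (w.drop m) = sufMax (w.drop j) ∧ sargN w m = sargN w j := by
  have hs := sargN_spec w j hj
  have hsc := seg_const (m - j) (w.drop j) (j : Int) (by simp; omega) (by rw [hs.1]; push_cast; omega)
  have hdd : (w.drop j).drop (m - j) = w.drop m := by
    rw [List.drop_drop]; congr 1; omega
  rw [hdd] at hsc
  have hc : (j : Int) + ((m - j : Nat) : Int) = (m : Nat) := by push_cast; omega
  rw [hc] at hsc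
  refine ⟨hsc.1, ?_⟩
  unfold sargN
  rw [hsc.2]

-- ---- the snoc / stack characterization of the records ----

lemma sufMax_snoc (t : List Int) (x : Int) (h : t ≠ []) : sufMax (t ++ [x]) = max (sufMax t) x := by
  induction t with
  | nil => simp at h
  | cons y t' ih =>
    cases t' with
    | nil => simp [sufMax]
    | cons z t'' =>
      rw [List.cons_append, sufMax_cons y ((z :: t'') ++ [x]) (by simp), ih (by simp)]
      rw [sufMax_cons y (z :: t'') (by simp)]
      omega

lemma recsP_snoc (l : List Int) : ∀ (j x : Int),
    recsP j (l ++ [x]) = (recsP j l).filter (fun p => decide (x < p.2)) ++ [((j + l.length : Int), x)] := by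
  induction l with
  | nil => intro j x; simp [recsP]
  | cons y t ih =>
    intro j x
    cases t with
    | nil =>
      simp only [List.cons_append, List.nil_append]
      rw [recsP_cons j y [x] (by simp)]
      simp only [recsP, sufMax]
      by_cases hxy : x < y
      · rw [if_pos hxy]
        simp [hxy]
      · rw [if_neg hxy]
        simp [hxy]
    | cons z t' =>
      rw [List.cons_append, recsP_cons j y ((z :: t') ++ [x]) (by simp)]
      rw [sufMax_snoc (z :: t') x (by simp), recsP_cons j y (z :: t') (by simp), ih (j + 1) x]
      have hlen : j + 1 + ((z :: t').length : Int) = j + ((y :: z :: t').length : Int) := by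
        simp; ring
      by_cases h1 : sufMax (z :: t') < y
      · by_cases h2 : x < y
        · rw [if_pos (by omega), if_pos h1]
          simp only [List.filter_cons, decide_eq_true_eq, if_pos h2, hlen]
          simp [h2]
        · rw [if_neg (by omega), if_pos h1]
          simp only [List.filter_cons, decide_eq_true_eq, hlen]
          simp [h2]
      · rw [if_neg (by omega), if_neg h1, hlen]

lemma recsP_val_le (l : List Int) : ∀ (j : Int) (p : Int × Int), p ∈ recsP j l → p.2 ≤ sufMax l := by
  induction l with
  | nil => intro j p h; simp [recsP] at h
  | cons y t ih =>
    intro j p h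
    cases t with
    | nil =>
      simp [recsP] at h
      simp [h, sufMax]
    | cons z t' =>
      rw [recsP_cons j y (z :: t') (by simp)] at h
      rw [sufMax_cons y (z :: t') (by simp)]
      by_cases h1 : sufMax (z :: t') < y
      · rw [if_pos h1] at h
        rcases List.mem_cons.mp h with rfl | h
        · simp
        · have := ih (j + 1) p h
          omega
      · rw [if_neg h1] at h
        have := ih (j + 1) p h
        omega

lemma recsP_pairwise (l : List Int) : ∀ (j : Int), (recsP j l).Pairwise (fun p q => q.2 < p.2) := by
  induction l with
  | nil => intro j; simp [recsP]
  | cons y t ih =>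
    intro j
    cases t with
    | nil => simp [recsP]
    | cons z t' =>
      rw [recsP_cons j y (z :: t') (by simp)]
      by_cases h1 : sufMax (z :: t') < y
      · rw [if_pos h1]
        refine List.Pairwise.cons ?_ (ih (j + 1))
        intro q hq
        have := recsP_val_le (z :: t') (j + 1) q hq
        simp only
        omega
      · rw [if_neg h1]
        exact ih (j + 1)

lemma popLe_eq_filter (x : Int) : ∀ (s : List (Int × Int × Option Int)),
    s.Pairwise (fun a b => a.2.1 < b.2.1) →
    popLe x s = s.filter (fun e => decide (x < e.2.1)) := by
  intro s
  induction s with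
  | nil => intro _; rfl
  | cons e rest ih =>
    intro hp
    rcases List.pairwise_cons.mp hp with ⟨hrel, hrest⟩
    simp only [popLe, List.filter_cons]
    by_cases hle : e.2.1 ≤ x
    · rw [if_pos hle, ih hrest]
      simp [show ¬ x < e.2.1 by omega]
    · rw [if_neg hle]
      have hx : x < e.2.1 := by omega
      simp only [hx, decide_true, if_pos]
      congr 1
      symm
      rw [List.filter_eq_self]
      intro b hb
      have := hrel b hb
      simp; omega

lemma take_succ_getD (l : List Int) (k : Nat) (h : k < l.length) :
    l.take (k + 1) = l.take k ++ [l.getD k 0] := by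
  rw [List.take_succ, List.getElem?_eq_getElem h]
  simp [List.getD_eq_getElem?_getD, List.getElem?_eq_getElem h]

lemma pminL_getD_zero (m x : Int) (t : List Int) :
    (pminL m (x :: t)).getD 0 0 = if x < m then x else m := by
  simp [pminL]

lemma buildStack_inv (nums w : List Int) (last : Int)
    (hn : 1 ≤ w.length)
    (hwn : ∀ k : Nat, k < w.length - 1 → w.getD k 0 = PySem.List.pyGetD nums (k : Int) 0)
    (hlast : w.getD (w.length - 1) 0 = last) :
    ∀ (d k : Nat), w.length - k = d → k ≤ w.length →
    buildStack nums (w.length : Int) last (PySem.List.pyRange (k : Int) (w.length : Int) 1)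
      (((recsP 0 (w.take k)).map (enrichW w)).reverse, pmS w k)
    = (((recsP 0 w).map (enrichW w)).reverse, pmS w w.length) := by
  intro d
  induction d with
  | zero =>
    intro k hd hk
    have : k = w.length := by omega
    subst this
    rw [PySem.List.pyRange_one_eq_nil (by omega)]
    simp [buildStack, List.take_of_length_le (le_refl _)]
  | succ d ih =>
    intro k hd hk
    have hklt : k < w.length := by omega
    rw [PySem.List.pyRange_one_cons (by exact_mod_cast hklt)]
    simp only [buildStack]
    have hx : (if (k : Int) = (w.length : Int) - 1 then last else PySem.List.pyGetD nums (k : Int) 0)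
        = w.getD k 0 := by
      by_cases hkl : k = w.length - 1
      · rw [if_pos (by omega), ← hlast, hkl]
      · rw [if_neg (by omega), hwn k (by omega)]
    rw [hx]
    have hpair : (((recsP 0 (w.take k)).map (enrichW w)).reverse).Pairwise
        (fun a b => a.2.1 < b.2.1) := by
      rw [List.pairwise_reverse, List.pairwise_map]
      have := recsP_pairwise (w.take k) 0
      exact this.imp (fun h => h)
    have hstack : ((k : Int), w.getD k 0, pmS w k) :: popLe (w.getD k 0) (((recsP 0 (w.take k)).map (enrichW w)).reverse)
        = ((recsP 0 (w.take (k + 1))).map (enrichW w)).reverse := by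
      rw [take_succ_getD w k hklt, recsP_snoc (w.take k) 0 (w.getD k 0)]
      rw [popLe_eq_filter _ _ hpair]
      rw [List.filter_reverse, List.filter_map]
      have hfil : (fun e => decide (w.getD k 0 < e.2.1)) ∘ (enrichW w)
          = fun p => decide (w.getD k 0 < p.2) := by
        funext p; rfl
      rw [hfil]
      have hlen2 : ((0 : Int) + ((w.take k).length : Int)) = (k : Int) := by
        simp [List.length_take]; omega
      rw [hlen2]
      simp only [List.map_append, List.map_cons, List.map_nil, List.reverse_append,
        List.reverse_cons, List.reverse_nil, List.nil_append, List.cons_append,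
        List.singleton_append]
      congr 1
    have hpm : (match pmS w k with
        | none => some (w.getD k 0)
        | some m => some (if w.getD k 0 < m then w.getD k 0 else m)) = pmS w (k + 1) := by
      unfold pmS
      rcases Nat.eq_zero_or_pos k with hk0 | hk0
      · subst hk0
        rw [if_pos rfl, if_neg (show ¬ (0 + 1 = 0) by omega)]
        simp only [Nat.add_sub_cancel]
        cases w with
        | nil => simp at hn
        | cons a t =>
          rw [pminL_getD_zero]
          simp
      · rw [if_neg (show ¬ k = 0 by omega), if_neg (show ¬ (k + 1 = 0) by omega)]
        simp only [Nat.add_sub_cancel]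
        have hrec := pminL_getD_succ w (w.getD 0 0) (k - 1) (by omega)
        have e2 : k - 1 + 1 = k := by omega
        rw [e2] at hrec
        rw [hrec]
    rw [hstack, hpm]
    have ecast : (k : Int) + 1 = ((k + 1 : Nat) : Int) := by push_cast; ring
    rw [ecast]
    exact ih (k + 1) (by omega) (by omega)

-- ---- record-entry characterization ----

lemma recsP_mem_spec (l : List Int) : ∀ (j : Nat) (p : Int × Int), p ∈ recsP (j : Int) l →
    ∃ k : Nat, p.1 = (k : Int) ∧ j ≤ k ∧ k < j + l.length ∧ p.2 = l.getD (k - j) 0 := by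
  induction l with
  | nil => intro j p h; simp [recsP] at h
  | cons y t ih =>
    intro j p h
    cases t with
    | nil =>
      simp [recsP] at h
      exact ⟨j, by simp [h]⟩
    | cons z t' =>
      rw [recsP_cons (j : Int) y (z :: t') (by simp)] at h
      have hmem : p = ((j : Int), y) ∨ p ∈ recsP ((j : Int) + 1) (z :: t') := by
        by_cases h1 : sufMax (z :: t') < y
        · rw [if_pos h1] at h
          exact List.mem_cons.mp h
        · rw [if_neg h1] at h
          exact Or.inr h
      rcases hmem with rfl | hmem
      · exact ⟨j, rfl, le_refl _, by simp, by simp⟩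
      · have ecast : ((j : Int)) + 1 = ((j + 1 : Nat) : Int) := by push_cast; ring
        rw [ecast] at hmem
        obtain ⟨k, hk1, hk2, hk3, hk4⟩ := ih (j + 1) p hmem
        refine ⟨k, hk1, by omega, by simp at hk3 ⊢; omega, ?_⟩
        rw [hk4]
        have : k - j = (k - (j + 1)) + 1 := by omega
        rw [this]
        simp

lemma getD_drop' (l : List Int) (j k : Nat) (hj : j ≤ k) :
    (l.drop j).getD (k - j) 0 = l.getD k 0 := by
  rw [List.getD_eq_getElem?_getD, List.getD_eq_getElem?_getD, List.getElem?_drop]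
  congr 2
  omega

lemma sufMax_at_sarg (w : List Int) (j : Nat) (h : j < w.length) :
    sufMax (w.drop j) = w.getD (sargN w j) 0 := by
  have hmem : (((sargN w j : Nat) : Int), sufMax (w.drop j)) ∈ recsP (j : Int) (w.drop j) := by
    rw [recs_spine w j h]; simp
  obtain ⟨k, hk1, hk2, hk3, hk4⟩ := recsP_mem_spec (w.drop j) j _ hmem
  have hkk : k = sargN w j := by
    simp only at hk1
    omega
  simp only at hk4
  rw [hk4, hkk, getD_drop' w j (sargN w j) (sargN_spec w j h).2.1]

lemma preOfRec_enrich (w : List Int) (p : Int × Int) (hp : p ∈ recsP 0 w) :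
    preOfRec (enrichW w p) = PySem.List.pyGetD (pminL (w.getD 0 0) w) p.1 0 := by
  have h0 : ((0 : Nat) : Int) = (0 : Int) := rfl
  rw [← h0] at hp
  obtain ⟨k, hk1, _, hk3, hk4⟩ := recsP_mem_spec w 0 p hp
  simp only [Nat.zero_add] at hk3
  simp only [Nat.sub_zero] at hk4
  rw [hk1, PySem.List.pyGetD_natCast]
  unfold preOfRec enrichW
  simp only [hk1, Int.toNat_natCast]
  unfold pmS
  cases hk0 : k with
  | zero =>
    simp only [if_pos rfl]
    cases w with
    | nil => simp at hk3
    | cons a t =>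
      rw [pminL_getD_zero]
      simp only [hk4, hk0]
      simp
  | succ k' =>
    simp only [if_neg (by omega : ¬ k' + 1 = 0), Nat.add_sub_cancel]
    have hrec := pminL_getD_succ w (w.getD 0 0) k' (by omega)
    rw [hrec, hk4, hk0]
    rw [min_def]
    split_ifs <;> omega

-- ---- validity equivalence ----

/-- the consecutive-records check on the suffix of records starting at j, phrased over a prefix-min list P -/
def chainB (w P : List Int) (j : Nat) : Bool :=
  ((recsP (j : Int) (w.drop j)).zip ((recsP (j : Int) (w.drop j)).drop 1)).any
    (fun pq => decide (PySem.List.pyGetD P pq.1.1 0 > pq.2.2))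

lemma chainB_last (w P : List Int) (j : Nat) (hj : j < w.length) (hge : w.length ≤ sargN w j + 1) :
    chainB w P j = false := by
  unfold chainB
  rw [recs_spine w j hj]
  have : w.drop (sargN w j + 1) = [] := by
    rw [List.drop_eq_nil_iff]; omega
  rw [this]
  simp [recsP]

lemma chainB_step (w P : List Int) (j : Nat) (hj : j < w.length) (hlt : sargN w j + 1 < w.length) :
    chainB w P j =
      (decide (P.getD (sargN w j) 0 > sufMax (w.drop (sargN w j + 1))) || chainB w P (sargN w j + 1)) := by
  unfold chainB
  rw [recs_spine w j hj]
  rw [recs_spine w (sargN w j + 1) hlt]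
  simp only [List.drop_succ_cons, List.drop_zero, List.zip_cons_cons, List.any_cons]
  congr 1
  simp [PySem.List.pyGetD_natCast]

lemma valid_to_chain (w P : List Int) : ∀ (d j : Nat), w.length - j = d → j < w.length →
    (∀ i : Nat, i + 1 < w.length → ¬ sufMax (w.drop (i + 1)) < P.getD i 0) →
    chainB w P j = false := by
  intro d
  induction d using Nat.strong_induction_on with
  | _ d ih =>
    intro j hd hj hav
    by_cases hend : w.length ≤ sargN w j + 1
    · exact chainB_last w P j hj hend
    · have hend' : sargN w j + 1 < w.length := by omega
      rw [chainB_step w P j hj hend']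
      have hs := sargN_spec w j hj
      have hbad : ¬ (P.getD (sargN w j) 0 > sufMax (w.drop (sargN w j + 1))) := by
        have := hav (sargN w j) hend'
        omega
      rw [decide_eq_false hbad, Bool.false_or]
      exact ih (w.length - (sargN w j + 1)) (by omega) (sargN w j + 1) rfl hend' hav

lemma chain_to_valid (w P : List Int)
    (hanti : ∀ (i k : Nat), i ≤ k → k < w.length → P.getD k 0 ≤ P.getD i 0) :
    ∀ (d j : Nat), w.length - j = d → j < w.length →
    chainB w P j = false →
    (∀ i : Nat, j ≤ i + 1 → i + 1 ≤ w.length → P.getD i 0 ≤ sufMax (w.drop j)) →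
    ∀ i : Nat, j ≤ i + 1 → i + 1 < w.length → ¬ sufMax (w.drop (i + 1)) < P.getD i 0 := by
  intro d
  induction d using Nat.strong_induction_on with
  | _ d ih =>
    intro j hd hj hch hseed i hji hiN
    by_cases hseg : i + 1 ≤ sargN w j
    · have := seg_const_drop w j (i + 1) hj hji hseg
      rw [this.1]
      have := hseed i hji (by omega)
      omega
    · have hs := sargN_spec w j hj
      have hend : sargN w j + 1 < w.length := by omega
      rw [chainB_step w P j hj hend] at hch
      have hpair : P.getD (sargN w j) 0 ≤ sufMax (w.drop (sargN w j + 1)) := by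
        rcases Bool.or_eq_false_iff.mp hch with ⟨h1, _⟩
        simpa using of_decide_eq_false h1
      have hch' : chainB w P (sargN w j + 1) = false :=
        (Bool.or_eq_false_iff.mp hch).2
      have hseed' : ∀ i2 : Nat, sargN w j + 1 ≤ i2 + 1 → i2 + 1 ≤ w.length →
          P.getD i2 0 ≤ sufMax (w.drop (sargN w j + 1)) := by
        intro i2 h1 h2
        have := hanti (sargN w j) i2 (by omega) (by omega)
        omega
      exact ih (w.length - (sargN w j + 1)) (by omega) (sargN w j + 1) rfl hend hch' hseed' i (by omega) hiN

lemma validLoop_iff (P : List Int) (S : List (Int × Int)) : ∀ (is : List Int),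
    validLoop P S is = true ↔ ∀ i ∈ is, ¬ ((PySem.List.pyGetD S (i + 1) (0, 0)).1 < PySem.List.pyGetD P i 0) := by
  intro is
  induction is with
  | nil => simp [validLoop]
  | cons i rest ih =>
    simp only [validLoop]
    split
    · rename_i hgt
      constructor
      · intro hfalse; exact absurd hfalse (by simp)
      · intro hall; exact absurd hgt (by simpa using hall i (by simp))
    · rename_i hle
      rw [ih]
      constructor
      · intro hall k hk
        rcases List.mem_cons.mp hk with rfl | hk
        · exact hle
        · exact hall k hk
      · intro hall k hk
        exact hall k (List.mem_cons_of_mem _ hk)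

lemma preFill_inv (a : List Int) (hN : 1 ≤ a.length) : ∀ (d k : Nat), a.length - k = d → 1 ≤ k → k ≤ a.length →
    preFill a ((pminL (a.getD 0 0) a).take k ++ List.replicate (a.length - k) 0)
        (PySem.List.pyRange (k : Int) (a.length : Int) 1) =
      pminL (a.getD 0 0) a := by
  intro d
  induction d with
  | zero =>
    intro k hd h1 h2
    have hk : k = a.length := by omega
    subst hk
    rw [PySem.List.pyRange_one_eq_nil (by omega)]
    simp only [preFill]
    rw [List.take_of_length_le (by rw [length_pminL]), Nat.sub_self]
    simp
  | succ d ih =>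
    intro k hd h1 h2
    have hk : k < a.length := by omega
    set P := pminL (a.getD 0 0) a with hP
    have hPlen : P.length = a.length := length_pminL a _
    rw [PySem.List.pyRange_one_cons (by exact_mod_cast hk)]
    simp only [preFill]
    have e1 : ((k : Int) - 1) = ((k - 1 : Nat) : Int) := by push_cast; omega
    have hgetprev : PySem.List.pyGetD (P.take k ++ List.replicate (a.length - k) 0) ((k : Int) - 1) 0 = P.getD (k - 1) 0 := by
      rw [e1, PySem.List.pyGetD_natCast]
      rw [List.getD_append _ _ _ _ (by rw [List.length_take]; omega)]
      rw [List.getD_eq_getElem?_getD, List.getD_eq_getElem?_getD, List.getElem?_take_of_lt (by omega)]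
    have hgetnum : PySem.List.pyGetD a (k : Int) 0 = a.getD k 0 := PySem.List.pyGetD_natCast _ _ _
    rw [hgetprev, hgetnum]
    have hval : min (P.getD (k - 1) 0) (a.getD k 0) = P.getD k 0 := by
      have hrec := pminL_getD_succ a (a.getD 0 0) (k - 1) (by omega)
      have hk1 : k - 1 + 1 = k := by omega
      rw [hk1] at hrec
      rw [← hP] at hrec
      rw [hrec]
      rcases le_or_gt (P.getD (k-1) 0) (a.getD k 0) with hc | hc
      · rw [min_eq_left hc, if_neg (by omega)]
      · rw [min_eq_right (by omega), if_pos hc]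
    rw [hval]
    have hset : PySem.List.pySetD (P.take k ++ List.replicate (a.length - k) 0) (k : Int) (P.getD k 0)
        = P.take (k + 1) ++ List.replicate (a.length - (k + 1)) 0 := by
      rw [PySem.List.pySetD_natCast]
      have hrep : List.replicate (a.length - k) (0 : Int) = 0 :: List.replicate (a.length - (k + 1)) 0 := by
        have e : a.length - k = (a.length - (k + 1)) + 1 := by omega
        rw [e, List.replicate_succ]
      rw [hrep, List.set_append_right _ _ (by rw [List.length_take]; omega)]
      have : k - (P.take k).length = 0 := by rw [List.length_take]; omega
      rw [this, List.set_cons_zero]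
      have htake : P.take (k + 1) = P.take k ++ [P.getD k 0] := by
        rw [List.take_succ]
        congr 1
        rw [List.getElem?_eq_getElem (by omega), List.getD_eq_getElem?_getD, List.getElem?_eq_getElem (by omega)]
        rfl
      rw [htake, List.append_assoc]
      rfl
    rw [hset]
    have e2 : (k : Int) + 1 = ((k + 1 : Nat) : Int) := by push_cast; ring
    rw [e2]
    exact ih (k + 1) (by omega) (by omega) (by omega)

lemma getD_rep_sufList (w : List Int) (k j : Nat) (h : j < w.length)
    (hj : k ≤ j) :
    (List.replicate k ((0:Int),(0:Int)) ++ sufList (k : Int) (w.drop k)).getD j (0, 0)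
      = (sufMax (w.drop j), sufArg (j : Int) (w.drop j)) := by
  rw [List.getD_eq_getElem?_getD, List.getElem?_append_right (by simp; omega)]
  simp only [List.length_replicate]
  rw [← List.getD_eq_getElem?_getD]
  have hlt : j - k < (w.drop k).length := by simp; omega
  rw [sufList_getD (w.drop k) (k : Int) (j - k) hlt]
  rw [List.drop_drop]
  have e1 : k + (j - k) = j := by omega
  have e2 : (k : Int) + ((j - k : Nat) : Int) = (j : Int) := by push_cast; omega
  rw [e1, e2]

lemma suf_entry_eq (w : List Int) (k : Nat) (hk : k + 1 < w.length) :
    (if w.getD k 0 > (sufMax (w.drop (k+1)), sufArg ((k+1 : Nat) : Int) (w.drop (k+1))).1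
      then (w.getD k 0, (k : Int))
      else (sufMax (w.drop (k+1)), sufArg ((k+1 : Nat) : Int) (w.drop (k+1))))
    = (sufMax (w.drop k), sufArg (k : Int) (w.drop k)) := by
  have hne : w.drop (k+1) ≠ [] := by simp; omega
  rw [drop_cons w k (by omega)]
  rw [sufMax_cons _ _ hne, sufArg_cons _ _ _ hne]
  have ecast : ((k + 1 : Nat) : Int) = (k : Int) + 1 := by push_cast; ring
  by_cases hrec : sufMax (w.drop (k+1)) < w.getD k 0
  · rw [if_pos (by simpa using hrec), if_pos hrec]
    have : max (w.getD k 0) (sufMax (w.drop (k+1))) = w.getD k 0 := by omega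
    rw [this]
  · rw [if_neg (by simpa using hrec), if_neg hrec]
    have : max (w.getD k 0) (sufMax (w.drop (k+1))) = sufMax (w.drop (k+1)) := by omega
    rw [this, ecast]

lemma sufFill_inv (w : List Int) : ∀ (k : Nat), k < w.length →
    sufFill w (List.replicate k ((0:Int),(0:Int)) ++ sufList (k : Int) (w.drop k))
        (PySem.List.pyRange ((k : Int) - 1) (-1) (-1)) =
      sufList 0 w := by
  intro k
  induction k with
  | zero =>
    intro _
    rw [PySem.List.pyRange_neg_one_eq_nil (by omega)]
    simp [sufFill]
  | succ k ih =>
    intro h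
    have e1 : ((k + 1 : Nat) : Int) - 1 = (k : Int) := by push_cast; ring
    rw [e1, PySem.List.pyRange_neg_one_cons (by omega)]
    simp only [sufFill]
    set L := List.replicate (k+1) ((0:Int),(0:Int)) ++ sufList ((k+1 : Nat) : Int) (w.drop (k+1)) with hL
    have hget : PySem.List.pyGetD L ((k : Int) + 1) (0, 0)
        = (sufMax (w.drop (k+1)), sufArg ((k+1 : Nat) : Int) (w.drop (k+1))) := by
      have ecast : (k : Int) + 1 = ((k + 1 : Nat) : Int) := by push_cast; ring
      rw [ecast, PySem.List.pyGetD_natCast]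
      exact getD_rep_sufList w (k+1) (k+1) h (le_refl _)
    have hgetv : PySem.List.pyGetD w (k : Int) 0 = w.getD k 0 := PySem.List.pyGetD_natCast _ _ _
    rw [hget, hgetv]
    rw [suf_entry_eq w k h]
    have hset : PySem.List.pySetD L (k : Int) (sufMax (w.drop k), sufArg (k : Int) (w.drop k))
        = List.replicate k ((0:Int),(0:Int)) ++ sufList (k : Int) (w.drop k) := by
      rw [PySem.List.pySetD_natCast, hL]
      rw [List.replicate_succ', List.append_assoc]
      rw [List.set_append_right _ _ (by simp)]
      simp only [List.length_replicate, Nat.sub_self]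
      rw [List.singleton_append, List.set_cons_zero]
      congr 1
      conv_rhs => rw [drop_cons w k (by omega)]
      simp only [sufList]
      rw [← drop_cons w k (by omega)]
      have ecast : (k : Int) + 1 = ((k + 1 : Nat) : Int) := by push_cast; ring
      rw [ecast]
    rw [hset]
    exact ih (by omega)

-- ---- emission equivalence ----

lemma edgeLoop_eq_emitB (nums w P : List Int)
    (hP : ∀ k : Nat, k < w.length - 1 → P.getD k 0 = (pminL (w.getD 0 0) w).getD k 0) :
    ∀ (d j fuel : Nat) (prev : Option (Int × Int × Option Int)) (acc : List (Int × Int)),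
    w.length - j = d → j ≤ w.length → d ≤ fuel →
    (1 < j → j < w.length → prevBound prev = (pminL (w.getD 0 0) w).getD (j - 1) 0) →
    edgeLoop nums P (sufList 0 w) (w.length : Int) fuel (j : Int) acc
      = emitB nums ((recsP (j : Int) (w.drop j)).map (enrichW w)) (j : Int) prev acc := by
  intro d
  induction d using Nat.strong_induction_on with
  | _ d ih =>
    intro j fuel prev acc hd hj hfuel hprev
    by_cases hjN : j < w.length
    · have hfuel1 : ∃ f, fuel = f + 1 := by
        cases fuel with
        | zero => omega
        | succ f => exact ⟨f, rfl⟩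
      obtain ⟨f, rfl⟩ := hfuel1
      simp only [edgeLoop]
      rw [if_pos (by exact_mod_cast hjN)]
      have hs := sargN_spec w j hjN
      have hr : (PySem.List.pyGetD (sufList 0 w) (j : Int) (0, 0)).2 = ((sargN w j : Nat) : Int) := by
        rw [PySem.List.pyGetD_natCast, sufList_getD w 0 j hjN]
        simp only [zero_add]
        exact hs.1
      rw [recs_spine w j hjN]
      simp only [List.map_cons, emitB]
      simp only [enrichW]
      rw [hr]
      have hedge : (if (j : Int) > 1
            then (acc ++ (PySem.List.pyRange (j : Int) ((sargN w j : Nat) : Int) 1).map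
                (fun i => (PySem.List.pyGetD nums i 0, PySem.List.pyGetD nums ((sargN w j : Nat) : Int) 0)))
              ++ [(PySem.List.pyGetD P ((j : Int) - 1) 0, PySem.List.pyGetD nums ((sargN w j : Nat) : Int) 0)]
            else (acc ++ (PySem.List.pyRange (j : Int) ((sargN w j : Nat) : Int) 1).map
                (fun i => (PySem.List.pyGetD nums i 0, PySem.List.pyGetD nums ((sargN w j : Nat) : Int) 0))))
          = (if (j : Int) > 1
            then (acc ++ (PySem.List.pyRange (j : Int) ((sargN w j : Nat) : Int) 1).map
                (fun i => (PySem.List.pyGetD nums i 0, PySem.List.pyGetD nums ((sargN w j : Nat) : Int) 0)))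
              ++ [(prevBound prev, PySem.List.pyGetD nums ((sargN w j : Nat) : Int) 0)]
            else (acc ++ (PySem.List.pyRange (j : Int) ((sargN w j : Nat) : Int) 1).map
                (fun i => (PySem.List.pyGetD nums i 0, PySem.List.pyGetD nums ((sargN w j : Nat) : Int) 0)))) := by
        by_cases hj1 : (j : Int) > 1
        · rw [if_pos hj1, if_pos hj1]
          have hval : PySem.List.pyGetD P ((j : Int) - 1) 0 = prevBound prev := by
            have e1 : ((j : Int) - 1) = ((j - 1 : Nat) : Int) := by push_cast; omega
            rw [e1, PySem.List.pyGetD_natCast, hP (j - 1) (by omega), hprev (by omega) hjN]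
          rw [hval]
        · rw [if_neg hj1, if_neg hj1]
      rw [hedge]
      have hprev' : 1 < sargN w j + 1 → sargN w j + 1 < w.length →
          prevBound (some (((sargN w j : Nat) : Int), sufMax (w.drop j), pmS w (((sargN w j : Nat) : Int)).toNat))
            = (pminL (w.getD 0 0) w).getD (sargN w j + 1 - 1) 0 := by
        intro h1 _
        have hr1 : 1 ≤ sargN w j := by omega
        have hsv : sufMax (w.drop j) = w.getD (sargN w j) 0 := sufMax_at_sarg w j hjN
        simp only [Int.toNat_natCast, prevBound]
        unfold pmS
        rw [if_neg (by omega)]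
        simp only [Nat.add_sub_cancel]
        have hrec := pminL_getD_succ w (w.getD 0 0) (sargN w j - 1) (by omega)
        have e2 : sargN w j - 1 + 1 = sargN w j := by omega
        rw [e2] at hrec
        rw [hrec, hsv, min_def]
        split_ifs <;> omega
      have ecast : ((sargN w j : Nat) : Int) + 1 = ((sargN w j + 1 : Nat) : Int) := by push_cast; ring
      rw [ecast]
      exact ih (w.length - (sargN w j + 1)) (by omega) (sargN w j + 1) f _ _ rfl (by omega) (by omega) hprev'
    · have hjeq : j = w.length := by omega
      subst hjeq
      rw [List.drop_length]
      simp only [recsP, List.map_nil, emitB]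
      cases fuel with
      | zero => simp [edgeLoop]
      | succ f =>
        simp only [edgeLoop]
        rw [if_neg (by omega)]

-- ---- assembling the two programs ----

lemma pySetD_last {α : Type} (xs : List α) (v : α) (h : xs ≠ []) :
    PySem.List.pySetD xs (-1) v = xs.set (xs.length - 1) v := by
  have hlen : 1 ≤ xs.length := List.length_pos_of_ne_nil h
  simp [PySem.List.pySetD, PySem.List.pySet?, PySem.List.pyIdx?, hlen]

lemma solveA_pre (a : List Int) (h : 1 ≤ a.length) :
    preFill a (PySem.List.pySetD (List.replicate a.length (0:Int)) 0 (PySem.List.pyGetD a 0 0))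
      (PySem.List.pyRange 1 (a.length : Int) 1) = pminL (a.getD 0 0) a := by
  have hget0 : PySem.List.pyGetD a 0 0 = a.getD 0 0 := PySem.List.pyGetD_zero _ _
  have hset : PySem.List.pySetD (List.replicate a.length (0:Int)) 0 (a.getD 0 0)
      = (pminL (a.getD 0 0) a).take 1 ++ List.replicate (a.length - 1) 0 := by
    rw [PySem.List.pySetD_of_nonneg _ _ (by omega)]
    have hrep : List.replicate a.length (0:Int) = 0 :: List.replicate (a.length - 1) 0 := by
      have e : a.length = (a.length - 1) + 1 := by omega
      rw [e, List.replicate_succ]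
      congr 1
    rw [hrep]
    simp only [Int.toNat_zero, List.set_cons_zero]
    cases a with
    | nil => simp at h
    | cons x t =>
      simp [pminL]
  rw [hget0, hset]
  have e1 : (1 : Int) = ((1 : Nat) : Int) := by norm_num
  rw [e1]
  exact preFill_inv a h (a.length - 1) 1 rfl (le_refl _) h

lemma solveA_suf (w : List Int) (h : 1 ≤ w.length) :
    sufFill w (PySem.List.pySetD (List.replicate w.length ((0:Int),(0:Int))) (-1)
        (PySem.List.pyGetD w (-1) 0, (w.length : Int) - 1))
      (PySem.List.pyRange ((w.length : Int) - 2) (-1) (-1)) = sufList 0 w := by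
  have hne : w ≠ [] := by cases w with | nil => simp at h | cons a t => simp
  have hgetlast : PySem.List.pyGetD w (-1) 0 = w.getD (w.length - 1) 0 := by
    rw [PySem.List.pyGetD_neg_one w 0 hne]
    rw [List.getLast_eq_getElem]
    rw [List.getD_eq_getElem?_getD, List.getElem?_eq_getElem (by omega)]
    rfl
  have hset : PySem.List.pySetD (List.replicate w.length ((0:Int),(0:Int))) (-1)
        (w.getD (w.length - 1) 0, (w.length : Int) - 1)
      = List.replicate (w.length - 1) ((0:Int),(0:Int)) ++ sufList (((w.length - 1 : Nat)) : Int) (w.drop (w.length - 1)) := by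
    rw [pySetD_last _ _ (by simp; omega)]
    simp only [List.length_replicate]
    have hrep : List.replicate w.length ((0:Int),(0:Int))
        = List.replicate (w.length - 1) ((0:Int),(0:Int)) ++ [((0:Int),(0:Int))] := by
      have e : w.length = (w.length - 1) + 1 := by omega
      conv_lhs => rw [e, List.replicate_succ']
    rw [hrep, List.set_append_right _ _ (by simp)]
    simp only [List.length_replicate, Nat.sub_self, List.set_cons_zero]
    congr 1
    have hdrop : w.drop (w.length - 1) = [w.getD (w.length - 1) 0] := by
      rw [drop_cons w (w.length - 1) (by omega)]
      have : w.length - 1 + 1 = w.length := by omega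
      rw [this, List.drop_length]
    rw [hdrop]
    simp only [sufList, sufMax, sufArg]
    congr 2
    push_cast; omega
  have e2 : (w.length : Int) - 2 = (((w.length - 1 : Nat)) : Int) - 1 := by push_cast; omega
  rw [hgetlast, hset, e2]
  exact sufFill_inv w (w.length - 1) (by omega)

lemma valid_iff_AV (w P : List Int) :
    (validLoop P (sufList 0 w) (PySem.List.pyRange 0 ((w.length : Int) - 1) 1) = true)
      ↔ (∀ i : Nat, i + 1 < w.length →
          ¬ sufMax (w.drop (i + 1)) < P.getD i 0) := by
  rw [validLoop_iff]
  constructor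
  · intro hall i hi
    have hmem : (i : Int) ∈ PySem.List.pyRange 0 ((w.length : Int) - 1) 1 := by
      rw [PySem.List.mem_pyRange_one]
      constructor
      · omega
      · omega
    have := hall (i : Int) hmem
    have ecast : (i : Int) + 1 = ((i + 1 : Nat) : Int) := by push_cast; ring
    rw [ecast, PySem.List.pyGetD_natCast, PySem.List.pyGetD_natCast] at this
    rw [sufList_getD w 0 (i + 1) hi] at this
    simpa using this
  · intro hAV i hmem
    rw [PySem.List.mem_pyRange_one] at hmem
    obtain ⟨h0, hlt⟩ := hmem
    have hk : i = ((i.toNat : Nat) : Int) := by omega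
    have hik : i.toNat + 1 < w.length := by omega
    have := hAV i.toNat hik
    rw [hk]
    have ecast : ((i.toNat : Nat) : Int) + 1 = ((i.toNat + 1 : Nat) : Int) := by push_cast; ring
    rw [ecast, PySem.List.pyGetD_natCast, PySem.List.pyGetD_natCast]
    rw [sufList_getD w 0 (i.toNat + 1) hik]
    simpa using this

lemma check_eq_chainB (w : List Int) :
    ((((recsP 0 w).map (enrichW w)).zip
        (PySem.List.slice ((recsP 0 w).map (enrichW w)) (some 1) none)).any
      (fun pq => decide (preOfRec pq.1 > pq.2.2.1)))
      = chainB w (pminL (w.getD 0 0) w) 0 := by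
  rw [PySem.List.slice_from_one, ← List.drop_one, ← List.map_drop, List.zip_map, List.any_map]
  unfold chainB
  rw [Nat.cast_zero, List.drop_zero]
  apply PySem.List.any_congr_mem
  intro pq hpq
  have hmem := (List.of_mem_zip hpq).1
  simp only [Function.comp_apply, Prod.map_fst, Prod.map_snd]
  simp only [preOfRec_enrich w pq.1 hmem]
  rfl

lemma preFill_congr (xs ys : List Int) : ∀ (is : List Int) (st : List Int),
    (∀ i ∈ is, PySem.List.pyGetD xs i 0 = PySem.List.pyGetD ys i 0) →
    preFill xs st is = preFill ys st is := by
  intro is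
  induction is with
  | nil => intro st _; rfl
  | cons i rest ih =>
    intro st h
    simp only [preFill]
    rw [h i (by simp)]
    exact ih _ (fun k hk => h k (by simp [hk]))

lemma sufFill_congr (xs ys : List Int) : ∀ (is : List Int) (st : List (Int × Int)),
    (∀ i ∈ is, PySem.List.pyGetD xs i 0 = PySem.List.pyGetD ys i 0) →
    sufFill xs st is = sufFill ys st is := by
  intro is
  induction is with
  | nil => intro st _; rfl
  | cons i rest ih =>
    intro st h
    simp only [sufFill]
    rw [h i (by simp)]
    exact ih _ (fun k hk => h k (by simp [hk]))

lemma seed_base (w : List Int) (hw : w ≠ [])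
    (i : Nat) (hi : i < w.length) :
    (pminL (w.getD 0 0) w).getD i 0 ≤ sufMax w := by
  have h0 : (pminL (w.getD 0 0) w).getD 0 0 = w.getD 0 0 := by
    cases w with
    | nil => simp at hw
    | cons x t => rw [pminL_getD_zero]; simp
  have hanti := pminL_anti w (w.getD 0 0) 0 i (by omega) hi
  have hhead2 : w.getD 0 0 ≤ sufMax w := by
    cases w with
    | nil => simp at hw
    | cons x t => simpa using head_le_sufMax x t
  omega

lemma pminL_take_congr : ∀ (k : Nat) (xs ys : List Int) (m : Int),
    xs.take (k + 1) = ys.take (k + 1) →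
    (pminL m xs).getD k 0 = (pminL m ys).getD k 0 := by
  intro k
  induction k with
  | zero =>
    intro xs ys m h
    cases xs with
    | nil =>
      cases ys with
      | nil => rfl
      | cons y t => simp at h
    | cons x t =>
      cases ys with
      | nil => simp at h
      | cons y t' =>
        simp only [List.take_succ_cons, List.take_zero, List.cons.injEq] at h
        rw [pminL_getD_zero, pminL_getD_zero, h.1]
  | succ k ih =>
    intro xs ys m h
    cases xs with
    | nil =>
      cases ys with
      | nil => rfl
      | cons y t => simp at h
    | cons x t =>
      cases ys with
      | nil => simp at h
      | cons y t' =>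
        simp only [List.take_succ_cons, List.cons.injEq] at h
        simp only [pminL, List.getD_cons_succ]
        rw [h.1]
        exact ih t t' _ h.2

theorem solve_eq_alt (n : Int) (nums : List Int) (h1 : 1 ≤ n) (h2 : n ≤ (nums.length : Int)) :
    solve n nums = solve_alt n nums := by
  set N := n.toNat with hNdef
  have hn : n = (N : Int) := by omega
  have hN1 : 1 ≤ N := by omega
  have hNlen : N ≤ nums.length := by omega
  have hnumsne : nums ≠ [] := by
    cases nums with
    | nil => simp at hNlen; omega
    | cons x t => simp
  set a := nums.take N with hadef
  have halen : a.length = N := by rw [hadef, List.length_take]; omega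
  set v := nums.getD (nums.length - 1) 0 with hvdef
  set w := nums.take (N - 1) ++ [v] with hwdef
  have hwlen : w.length = N := by rw [hwdef]; simp [List.length_take]; omega
  have hak : ∀ k : Nat, k < N → a.getD k 0 = nums.getD k 0 := by
    intro k hk
    rw [hadef, List.getD_eq_getElem?_getD, List.getD_eq_getElem?_getD, List.getElem?_take_of_lt hk]
  have haw : ∀ k : Nat, k < N - 1 → w.getD k 0 = nums.getD k 0 := by
    intro k hk
    rw [hwdef, List.getD_append _ _ _ _ (by rw [List.length_take]; omega)]
    rw [List.getD_eq_getElem?_getD, List.getD_eq_getElem?_getD, List.getElem?_take_of_lt (by omega)]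
  have htoNat : ((N : Int)).toNat = N := by omega
  have hlastA : PySem.List.pyGetD nums (-1) 0 = v := by
    rw [PySem.List.pyGetD_neg_one nums 0 hnumsne]
    rw [hvdef, List.getLast_eq_getElem, List.getD_eq_getElem?_getD, List.getElem?_eq_getElem (by omega)]
    rfl
  have hlastw : w.getD (w.length - 1) 0 = v := by
    have hd : w.drop (w.length - 1) = [v] := by
      rw [hwdef]
      have hlen1 : (nums.take (N - 1)).length = N - 1 := by simp; omega
      have : (nums.take (N - 1) ++ [v]).length - 1 = (nums.take (N - 1)).length := by
        simp [hlen1]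
      rw [this, List.drop_left]
    have := getD_drop' w (w.length - 1) (w.length - 1) (le_refl _)
    simp only [Nat.sub_self] at this
    rw [← this, hd]
    rfl
  set P := pminL (a.getD 0 0) a with hPdef
  set Q := pminL (w.getD 0 0) w with hQdef
  have hpre : preFill nums (PySem.List.pySetD (List.replicate N (0:Int)) 0 (PySem.List.pyGetD nums 0 0))
      (PySem.List.pyRange 1 (N : Int) 1) = P := by
    have hget0 : PySem.List.pyGetD nums 0 0 = PySem.List.pyGetD a 0 0 := by
      rw [PySem.List.pyGetD_zero, PySem.List.pyGetD_zero, hak 0 (by omega)]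
    rw [hget0]
    rw [preFill_congr nums a (PySem.List.pyRange 1 (N : Int) 1) _ (by
      intro i hi
      rw [PySem.List.mem_pyRange_one] at hi
      have h0 : (0 : Int) ≤ i := by omega
      rw [PySem.List.pyGetD_of_nonneg _ _ h0, PySem.List.pyGetD_of_nonneg _ _ h0]
      exact (hak i.toNat (by omega)).symm)]
    rw [hPdef, ← halen]
    exact solveA_pre a (by omega)
  have hcongr_back : ∀ i ∈ PySem.List.pyRange ((N : Int) - 2) (-1) (-1),
      PySem.List.pyGetD nums i 0 = PySem.List.pyGetD w i 0 := by
    intro i hi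
    rw [PySem.List.mem_pyRange_neg_one] at hi
    have h0 : (0 : Int) ≤ i := by omega
    rw [PySem.List.pyGetD_of_nonneg _ _ h0, PySem.List.pyGetD_of_nonneg _ _ h0]
    exact (haw i.toNat (by omega)).symm
  have hlastAw : PySem.List.pyGetD nums (-1) 0 = PySem.List.pyGetD w (-1) 0 := by
    rw [hlastA, hwdef, PySem.List.pyGetD_neg_one_append_singleton]
  have hsuf : sufFill nums (PySem.List.pySetD (List.replicate N ((0:Int),(0:Int))) (-1)
      (PySem.List.pyGetD nums (-1) 0, (N : Int) - 1))
      (PySem.List.pyRange ((N : Int) - 2) (-1) (-1)) = sufList 0 w := by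
    rw [hlastAw]
    rw [sufFill_congr nums w (PySem.List.pyRange ((N : Int) - 2) (-1) (-1)) _ hcongr_back]
    rw [← hwlen]
    exact solveA_suf w (by omega)
  have hbuild : buildStack nums (N : Int) v (PySem.List.pyRange 0 (N : Int) 1) ([], none)
      = (((recsP 0 w).map (enrichW w)).reverse, pmS w w.length) := by
    have h0cast : (0 : Int) = ((0 : Nat) : Int) := rfl
    have hstart : (([] : List (Int × Int × Option Int)), (none : Option Int))
        = (((recsP 0 (w.take 0)).map (enrichW w)).reverse, pmS w 0) := by
      simp [recsP, pmS]
    rw [hn] at h1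
    rw [hstart, h0cast, ← hwlen]
    exact buildStack_inv nums w v (by omega)
      (fun k hk => by
        rw [PySem.List.pyGetD_natCast]
        exact haw k (by omega))
      hlastw w.length 0 (by omega) (by omega)
  have hanti : ∀ (i k : Nat), i ≤ k → k < w.length → Q.getD k 0 ≤ Q.getD i 0 := by
    intro i k hik hk
    exact pminL_anti w _ i k hik hk
  have hPQ : ∀ k : Nat, k < N - 1 → P.getD k 0 = Q.getD k 0 := by
    intro k hk
    have hhead : a.getD 0 0 = w.getD 0 0 := by
      rw [hak 0 (by omega), haw 0 (by omega)]
    rw [hQdef, ← hhead]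
    apply pminL_take_congr k a w
    have hta : a.take (k + 1) = nums.take (k + 1) := by
      rw [hadef, List.take_take]
      congr 1
      omega
    have htw : w.take (k + 1) = nums.take (k + 1) := by
      rw [hwdef, List.take_append_of_le_length (by simp; omega), List.take_take]
      congr 1
      omega
    rw [hta, htw]
  have hiff : (validLoop P (sufList 0 w) (PySem.List.pyRange 0 ((N : Int) - 1) 1) = true)
      ↔ chainB w Q 0 = false := by
    have hNw : ((N : Int)) - 1 = ((w.length : Int)) - 1 := by rw [hwlen]
    rw [hNw]
    rw [valid_iff_AV w P]
    constructor
    · intro hv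
      refine valid_to_chain w Q w.length 0 (by omega) (by omega) ?_
      intro i hi
      rw [← hPQ i (by omega)]
      exact hv i hi
    · intro hc i hi
      rw [hPQ i (by omega)]
      refine chain_to_valid w Q hanti w.length 0 (by omega) (by omega) hc ?_ i (by omega) hi
      intro i2 _ hi2
      rw [List.drop_zero]
      exact seed_base w (by rw [hwdef]; simp) i2 (by omega)
  have hfinal : (((recsP 0 w).map (enrichW w)).reverse).reverse = (recsP 0 w).map (enrichW w) :=
    List.reverse_reverse _
  simp only [solve, solve_alt]
  rw [hn, htoNat, hlastA, hpre]
  rw [show (PySem.List.pySetD (List.replicate N ((0:Int),(0:Int))) (-1) (v, (N : Int) - 1)) =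
      (PySem.List.pySetD (List.replicate N ((0:Int),(0:Int))) (-1) (PySem.List.pyGetD nums (-1) 0, (N : Int) - 1))
    from by rw [hlastA]]
  rw [hsuf, hbuild, hfinal, check_eq_chainB w, ← hQdef]
  cases hv : validLoop P (sufList 0 w) (PySem.List.pyRange 0 ((N : Int) - 1) 1) with
  | true =>
    have hc : chainB w Q 0 = false := hiff.mp hv
    rw [if_neg (by decide), hc, if_neg (by decide)]
    have h0cast : (0 : Int) = ((0 : Nat) : Int) := rfl
    have := edgeLoop_eq_emitB nums w P
      (fun k hk => hPQ k (by omega)) w.length 0 (N + 1) none [] (by omega) (by omega) (by omega)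
      (by intro h; omega)
    rw [List.drop_zero, Nat.cast_zero, hwlen] at this
    exact this
  | false =>
    have hc : chainB w Q 0 = true := by
      cases hcb : chainB w Q 0 with
      | false => rw [hiff.mpr hcb] at hv; exact absurd hv (by simp)
      | true => rfl
    rw [hc, if_pos rfl, if_pos rfl]

-- ===== VERDICT (by name: the statement is the Claim_ definition above) =====
theorem solve_spec : Claim_equal_solve := by
  intro n nums _ hpre
  show solve n nums = solve_alt n nums
  exact solve_eq_alt n nums hpre.1 hpre.2
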